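-- pv_equiv track=rewrite | github.com/JonathanJihwanKim/pbip_model_lenz | src/model_lenz/parsers/tmdl.py | _find_unquoted
-- ===== SOURCE A (Python) =====
-- def _find_unquoted(s: str, ch: str, start: int = 0) -> int:
--     """Find character ``ch`` not inside single-quoted segments. -1 if absent."""
--     in_quote = False
--     i = start
--     while i < len(s):
--         c = s[i]
--         if c == "'":
--             # Look ahead for `''` escape inside a quoted segment
--             if in_quote and i + 1 < len(s) and s[i + 1] == "'":
--                 i += 2
--                 continue
--             in_quote = not in_quote
--         elif c == ch and not in_quote:
--             return i
--         i += 1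
--     return -1
-- ===== SOURCE B (Python) =====
-- def _skip_quoted(s: str, p: int) -> int:
--     """p = index just after an opening quote; return index after the closing
--     quote, treating '' as an escaped quote, or -1 if unterminated."""
--     while True:
--         e = s.find("'", p)
--         if e == -1:
--             return -1
--         if e + 1 < len(s) and s[e + 1] == "'":
--             p = e + 2
--         else:
--             return e + 1
--
--
-- def _find_unquoted(s: str, ch: str, start: int = 0) -> int:
--     """Find character ``ch`` not inside single-quoted segments. -1 if absent."""
--     if len(ch) != 1 or ch == "'":
--         return -1  # only a single non-quote character can ever match
--     pos = start
--     while True: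
--         c = s.find(ch, pos)
--         if c == -1:
--             return -1
--         q = s.find("'", pos)
--         if q == -1 or c < q:
--             return c
--         pos = _skip_quoted(s, q + 1)
--         if pos == -1:
--             return -1
-- ===== Notes on version B (the rewrite author's own statement) =====
-- stated objective: alternative
-- what changed: Replaced A's per-character quote-state scan by a find-based jumping scan: a cursor jumps between str.find results for ch and the quote, skipping whole quoted segments (with a ''-escape subloop) instead of toggling an in_quote flag at every character (same O(n), but the scanning runs inside C-level str.find); degenerate ch (multi-char, empty, or the quote itself) is rejected up front.
-- outside the precondition, e.g. on _find_unquoted('ab', 'a', -2): A returns -2, B returns 0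
import Mathlib
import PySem

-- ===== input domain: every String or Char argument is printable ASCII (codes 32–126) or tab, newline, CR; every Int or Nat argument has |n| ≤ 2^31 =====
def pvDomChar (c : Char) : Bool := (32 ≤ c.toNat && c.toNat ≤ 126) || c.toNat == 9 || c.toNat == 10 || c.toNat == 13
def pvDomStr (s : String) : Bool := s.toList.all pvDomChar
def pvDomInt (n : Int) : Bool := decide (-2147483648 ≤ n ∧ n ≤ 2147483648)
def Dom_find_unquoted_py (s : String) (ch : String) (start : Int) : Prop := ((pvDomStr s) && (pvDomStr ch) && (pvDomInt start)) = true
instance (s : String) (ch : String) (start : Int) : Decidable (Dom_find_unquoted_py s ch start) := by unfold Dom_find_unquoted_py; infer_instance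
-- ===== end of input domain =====

-- B replaces A's per-character quote-state scan by a find-based jumping scan (the cursor
-- jumps between str.find results, skipping whole quoted segments); objective: alternative.

-- ===== PORT A =====
-- A's while loop: i steps one character at a time, toggling / escaping on quotes
-- (fuel = the standard total-recursion device; len(s)+2 steps always suffice for start ≥ 0).
def aLoop (cs chl : List Char) : Nat → Int → Bool → Int
  | 0, _, _ => -1
  | fuel + 1, i, inq =>
    if i < (cs.length : Int) then
      match PySem.List.pyGet? cs i with
      | none => -1   -- Python raises IndexError here (only when i < -len(s)); outside Pre_
      | some c =>
        if c = '\'' then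
          if inq = true ∧ i + 1 < (cs.length : Int) ∧ PySem.List.pyGet? cs (i + 1) = some '\'' then
            aLoop cs chl fuel (i + 2) inq
          else aLoop cs chl fuel (i + 1) (!inq)
        else if [c] = chl ∧ inq = false then i
        else aLoop cs chl fuel (i + 1) inq
    else -1

def find_unquoted_py (s : String) (ch : String) (start : Int) : Int :=
  aLoop s.toList ch.toList (s.toList.length + 2) start false


-- ===== PORT B =====
-- B's helper _skip_quoted (inner while loop), then B's outer loop: jump to the next
-- ch / quote via str.find; report ch if it comes first, else skip the quoted segment.
def bSkip (cs : List Char) : Nat → Int → Int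
  | 0, _ => -1
  | fuel + 1, p =>
    if PySem.Chars.findFrom cs ['\''] p none = -1 then -1
    else if PySem.Chars.findFrom cs ['\''] p none + 1 < (cs.length : Int) ∧
        PySem.List.pyGet? cs (PySem.Chars.findFrom cs ['\''] p none + 1) = some '\'' then
      bSkip cs fuel (PySem.Chars.findFrom cs ['\''] p none + 2)
    else PySem.Chars.findFrom cs ['\''] p none + 1

def bOuter (cs chl : List Char) : Nat → Int → Int
  | 0, _ => -1
  | fuel + 1, pos =>
    if PySem.Chars.findFrom cs chl pos none = -1 then -1
    else if PySem.Chars.findFrom cs ['\''] pos none = -1 ∨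
        PySem.Chars.findFrom cs chl pos none < PySem.Chars.findFrom cs ['\''] pos none then
      PySem.Chars.findFrom cs chl pos none
    else if bSkip cs (cs.length + 2) (PySem.Chars.findFrom cs ['\''] pos none + 1) = -1 then -1
    else bOuter cs chl fuel (bSkip cs (cs.length + 2) (PySem.Chars.findFrom cs ['\''] pos none + 1))

def find_unquoted_py_alt (s : String) (ch : String) (start : Int) : Int :=
  if PySem.Str.len ch ≠ 1 ∨ ch = "'" then -1
  else bOuter s.toList ch.toList (s.toList.length + 2) start

-- ===== PRECONDITION & SPEC =====
-- Pre_ excludes negative start, which is outside this helper's natural domain (its default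
-- is 0): there A raises IndexError (when start < -len(s)) or scans via Python
-- negative-index wraparound, re-traversing the string and possibly returning a negative position.
def Pre_find_unquoted_py (s : String) (ch : String) (start : Int) : Prop := 0 ≤ start
instance (s : String) (ch : String) (start : Int) : Decidable (Pre_find_unquoted_py s ch start) := by unfold Pre_find_unquoted_py; infer_instance

def pvWitness_find_unquoted_py : String × String × Int := ("a,'b,','c", ",", 0)

def Spec_find_unquoted_py (s : String) (ch : String) (start : Int) (out : Int) : Prop := out = find_unquoted_py_alt s ch start
instance (s : String) (ch : String) (start : Int) (out : Int) : Decidable (Spec_find_unquoted_py s ch start out) := by unfold Spec_find_unquoted_py; infer_instance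

-- ===== CLAIM (what is proved, stated in full; the proofs are below) =====
def Claim_equal_find_unquoted_py : Prop := ∀ (s : String) (ch : String) (start : Int), Dom_find_unquoted_py s ch start → Pre_find_unquoted_py s ch start → Spec_find_unquoted_py s ch start (find_unquoted_py s ch start)

-- ===== LEMMAS AND PROOFS =====

theorem pv_findFrom_ge (cs sub : List Char) (p : Int)
    (h : PySem.Chars.findFrom cs sub p none ≠ -1) : p ≤ PySem.Chars.findFrom cs sub p none := by
  have h0 := PySem.Chars.neg_one_le_find (List.drop (Int.toNat 0) (List.take ((cs.length : Int)).toNat cs)) sub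
  have h1 := PySem.Chars.neg_one_le_find (List.drop (p + (cs.length : Int)).toNat (List.take ((cs.length : Int)).toNat cs)) sub
  have h2 := PySem.Chars.neg_one_le_find (List.drop p.toNat (List.take ((cs.length : Int)).toNat cs)) sub
  simp only [PySem.Chars.findFrom] at h ⊢
  split_ifs at h ⊢ <;> omega

theorem pv_findFrom_le (cs sub : List Char) (p : Int) :
    PySem.Chars.findFrom cs sub p none ≤ (cs.length : Int) := by
  have h0 := PySem.Chars.find_le_length (List.drop (Int.toNat 0) (List.take ((cs.length : Int)).toNat cs)) sub
  have h1 := PySem.Chars.find_le_length (List.drop (p + (cs.length : Int)).toNat (List.take ((cs.length : Int)).toNat cs)) sub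
  have h2 := PySem.Chars.find_le_length (List.drop p.toNat (List.take ((cs.length : Int)).toNat cs)) sub
  have l0 : (List.drop (Int.toNat 0) (List.take ((cs.length : Int)).toNat cs)).length = cs.length - Int.toNat 0 := by simp
  have l1 : (List.drop (p + (cs.length : Int)).toNat (List.take ((cs.length : Int)).toNat cs)).length = cs.length - (p + (cs.length : Int)).toNat := by simp
  have l2 : (List.drop p.toNat (List.take ((cs.length : Int)).toNat cs)).length = cs.length - p.toNat := by simp
  simp only [PySem.Chars.findFrom]
  split_ifs <;> omega
theorem pv_singleton_prefix (a : Char) (t : List Char) : [a] <+: t ↔ t.head? = some a := by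
  cases t <;> simp [List.cons_prefix_cons, eq_comm]
theorem pv_occ (a : Char) (l : List Char) (m : Nat) : [a] <+: l.drop m ↔ l[m]? = some a := by
  rw [pv_singleton_prefix, List.head?_drop]
theorem pv_findFrom_gt (cs sub : List Char) (k : Nat) (hk : cs.length < k) :
    PySem.Chars.findFrom cs sub (k : Int) none = -1 := by
  simp only [PySem.Chars.findFrom]
  split_ifs <;> omega

theorem pv_ff_no_occ (cs : List Char) (a : Char) (k : Nat)
    (h : PySem.Chars.findFrom cs [a] (k : Int) none = -1) (m : Nat) (hm : k ≤ m) :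
    cs[m]? ≠ some a := by
  intro hma
  by_cases hk : k ≤ cs.length
  · rw [PySem.Chars.findFrom_natCast_eq_neg_one_iff cs [a] k hk] at h
    apply h
    rw [List.singleton_infix_iff]
    have : a ∈ List.drop m cs := by
      have := (pv_occ a cs m).2 hma
      exact this.mem (by simp)
    have hsub : List.drop m cs <:+ List.drop k cs := by
      have he : List.drop m cs = List.drop (m - k) (List.drop k cs) := by
        rw [List.drop_drop]; congr 1; omega
      rw [he]; exact List.drop_suffix _ _
    exact hsub.subset this
  · have : cs.length ≤ m := by omega
    rw [List.getElem?_eq_none this] at hma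
    simp at hma

theorem pv_ff_found (cs : List Char) (a : Char) (k : Nat)
    (h : PySem.Chars.findFrom cs [a] (k : Int) none ≠ -1) :
    ∃ e : Nat, PySem.Chars.findFrom cs [a] (k : Int) none = (e : Int) ∧ k ≤ e ∧
      cs[e]? = some a ∧ ∀ m : Nat, k ≤ m → m < e → cs[m]? ≠ some a := by
  by_cases hk : k ≤ cs.length
  · obtain ⟨h1, h2, h3⟩ := PySem.Chars.findFrom_natCast_spec cs [a] k hk h
    refine ⟨(PySem.Chars.findFrom cs [a] (k : Int) none).toNat, by omega, by omega, ?_, ?_⟩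
    · exact (pv_occ a cs _).1 h2
    · intro m hm1 hm2 hma
      exact h3 m hm1 hm2 ((pv_occ a cs m).2 hma)
  · exact absurd (pv_findFrom_gt cs [a] k (by omega)) h

theorem pv_bSkip_ge (cs : List Char) (f : Nat) (p : Int) (h : bSkip cs f p ≠ -1) :
    p + 1 ≤ bSkip cs f p := by
  induction f generalizing p with
  | zero => simp [bSkip] at h
  | succ g ih =>
    simp only [bSkip] at h ⊢
    split_ifs at h ⊢ with h1 h2
    · omega
    · have hge := pv_findFrom_ge cs ['\''] p h1
      have := ih (PySem.Chars.findFrom cs ['\''] p none + 2) h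
      omega
    · have hge := pv_findFrom_ge cs ['\''] p h1
      omega

theorem pv_bSkip_le (cs : List Char) (f : Nat) (p : Int) (h : bSkip cs f p ≠ -1) :
    bSkip cs f p ≤ (cs.length : Int) + 1 := by
  induction f generalizing p with
  | zero => simp [bSkip] at h
  | succ g ih =>
    simp only [bSkip] at h ⊢
    split_ifs at h ⊢ with h1 h2
    · omega
    · exact ih (PySem.Chars.findFrom cs ['\''] p none + 2) h
    · have := pv_findFrom_le cs ['\''] p
      omega

theorem pv_bSkip_fuel (cs : List Char) (f1 f2 : Nat) (p : Nat)
    (h1 : cs.length + 2 ≤ p + 2 * f1) (h2 : cs.length + 2 ≤ p + 2 * f2) :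
    bSkip cs f1 (p : Int) = bSkip cs f2 (p : Int) := by
  induction f1 generalizing f2 p with
  | zero =>
    have hgt : PySem.Chars.findFrom cs ['\''] (p : Int) none = -1 :=
      pv_findFrom_gt cs ['\''] p (by omega)
    cases f2 with
    | zero => rfl
    | succ g => simp only [bSkip, if_pos hgt]
  | succ f ih =>
    cases f2 with
    | zero =>
      have hgt : PySem.Chars.findFrom cs ['\''] (p : Int) none = -1 :=
        pv_findFrom_gt cs ['\''] p (by omega)
      simp only [bSkip, if_pos hgt]
    | succ g =>
      simp only [bSkip]
      by_cases hf : PySem.Chars.findFrom cs ['\''] (p : Int) none = -1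
      · rw [if_pos hf, if_pos hf]
      · rw [if_neg hf, if_neg hf]
        obtain ⟨e, he, hpe, hge', hno⟩ := pv_ff_found cs '\'' p hf
        by_cases hesc : PySem.Chars.findFrom cs ['\''] (p : Int) none + 1 < (cs.length : Int) ∧
            PySem.List.pyGet? cs (PySem.Chars.findFrom cs ['\''] (p : Int) none + 1) = some '\''
        · rw [if_pos hesc, if_pos hesc, he]
          have : ((e : Int) + 2) = ((e + 2 : Nat) : Int) := by push_cast; ring
          rw [this]
          exact ih g (e + 2) (by omega) (by omega)
        · rw [if_neg hesc, if_neg hesc]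

theorem pv_bOuter_fuel (cs chl : List Char) (f1 f2 : Nat) (pos : Nat)
    (h1 : cs.length + 2 ≤ pos + 2 * f1) (h2 : cs.length + 2 ≤ pos + 2 * f2) :
    bOuter cs chl f1 (pos : Int) = bOuter cs chl f2 (pos : Int) := by
  induction f1 generalizing f2 pos with
  | zero =>
    have hgt : PySem.Chars.findFrom cs chl (pos : Int) none = -1 :=
      pv_findFrom_gt cs chl pos (by omega)
    cases f2 with
    | zero => rfl
    | succ g => simp only [bOuter, if_pos hgt]
  | succ f ih =>
    cases f2 with
    | zero =>
      have hgt : PySem.Chars.findFrom cs chl (pos : Int) none = -1 :=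
        pv_findFrom_gt cs chl pos (by omega)
      simp only [bOuter, if_pos hgt]
    | succ g =>
      simp only [bOuter]
      by_cases hc : PySem.Chars.findFrom cs chl (pos : Int) none = -1
      · rw [if_pos hc, if_pos hc]
      · rw [if_neg hc, if_neg hc]
        by_cases hq : PySem.Chars.findFrom cs ['\''] (pos : Int) none = -1 ∨
            PySem.Chars.findFrom cs chl (pos : Int) none < PySem.Chars.findFrom cs ['\''] (pos : Int) none
        · rw [if_pos hq, if_pos hq]
        · rw [if_neg hq, if_neg hq]
          have hqne : PySem.Chars.findFrom cs ['\''] (pos : Int) none ≠ -1 := by tauto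
          have hgeq := pv_findFrom_ge cs ['\''] (pos : Int) hqne
          have hleq := pv_findFrom_le cs ['\''] (pos : Int)
          by_cases hbs : bSkip cs (cs.length + 2) (PySem.Chars.findFrom cs ['\''] (pos : Int) none + 1) = -1
          · rw [if_pos hbs, if_pos hbs]
          · rw [if_neg hbs, if_neg hbs]
            have hge := pv_bSkip_ge cs (cs.length + 2) _ hbs
            have hle := pv_bSkip_le cs (cs.length + 2) _ hbs
            have hr : bSkip cs (cs.length + 2) (PySem.Chars.findFrom cs ['\''] (pos : Int) none + 1)
                = (((bSkip cs (cs.length + 2) (PySem.Chars.findFrom cs ['\''] (pos : Int) none + 1)).toNat : Nat) : Int) := by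
              omega
            rw [hr]
            exact ih g _ (by omega) (by omega)

theorem pv_aLoop_fuel (cs chl : List Char) (f1 f2 : Nat) (k : Nat) (inq : Bool)
    (h1 : cs.length ≤ k + f1) (h2 : cs.length ≤ k + f2) :
    aLoop cs chl f1 (k : Int) inq = aLoop cs chl f2 (k : Int) inq := by
  induction f1 generalizing f2 k inq with
  | zero =>
    have hk : ¬ ((k : Int) < (cs.length : Int)) := by omega
    cases f2 with
    | zero => rfl
    | succ g => simp only [aLoop, if_neg hk]
  | succ f ih =>
    by_cases hk : (k : Int) < (cs.length : Int)
    · have hkn : k < cs.length := by exact_mod_cast hk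
      cases f2 with
      | zero => omega
      | succ g =>
        simp only [aLoop, if_pos hk]
        cases hg : PySem.List.pyGet? cs (k : Int) with
        | none => rfl
        | some c =>
          simp only
          by_cases hq : c = '\''
          · rw [if_pos hq, if_pos hq]
            by_cases hesc : inq = true ∧ (k : Int) + 1 < (cs.length : Int) ∧ PySem.List.pyGet? cs ((k : Int) + 1) = some '\''
            · rw [if_pos hesc, if_pos hesc]
              have := ih g (k + 2) inq (by omega) (by omega)
              push_cast at this
              exact this
            · rw [if_neg hesc, if_neg hesc]
              have := ih g (k + 1) (!inq) (by omega) (by omega)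
              push_cast at this
              exact this
          · rw [if_neg hq, if_neg hq]
            by_cases hm : [c] = chl ∧ inq = false
            · rw [if_pos hm, if_pos hm]
            · rw [if_neg hm, if_neg hm]
              have := ih g (k + 1) inq (by omega) (by omega)
              push_cast at this
              exact this
    · cases f2 with
      | zero => simp only [aLoop, if_neg hk]
      | succ g => simp only [aLoop, if_neg hk]

theorem pv_aLoop_deg (cs chl : List Char) (hdeg : ∀ x : Char, [x] = chl → x = '\'')
    (f : Nat) (i : Int) (inq : Bool) : aLoop cs chl f i inq = -1 := by
  induction f generalizing i inq with
  | zero => rfl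
  | succ g ih =>
    simp only [aLoop]
    by_cases h1 : i < (cs.length : Int)
    · rw [if_pos h1]
      cases hg : PySem.List.pyGet? cs i with
      | none => rfl
      | some c =>
        simp only
        by_cases h2 : c = '\''
        · rw [if_pos h2]
          by_cases h3 : inq = true ∧ i + 1 < (cs.length : Int) ∧ PySem.List.pyGet? cs (i + 1) = some '\''
          · rw [if_pos h3]; exact ih (i + 2) inq
          · rw [if_neg h3]; exact ih (i + 1) (!inq)
        · rw [if_neg h2, if_neg (by rintro ⟨hx, -⟩; exact h2 (hdeg c hx))]
          exact ih (i + 1) inq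
    · rw [if_neg h1]

theorem pv_aLoop_none (cs : List Char) (c0 : Char) (f : Nat) (k : Nat) (inq : Bool)
    (h : ∀ m : Nat, k ≤ m → cs[m]? ≠ some c0) : aLoop cs [c0] f (k : Int) inq = -1 := by
  induction f generalizing k inq with
  | zero => rfl
  | succ g ih =>
    simp only [aLoop]
    by_cases h1 : (k : Int) < (cs.length : Int)
    · rw [if_pos h1, PySem.List.pyGet?_natCast]
      have hk : k < cs.length := by exact_mod_cast h1
      cases hg : cs[k]? with
      | none => rfl
      | some c =>
        simp only
        by_cases h2 : c = '\''
        · rw [if_pos h2]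
          by_cases h3 : inq = true ∧ (k : Int) + 1 < (cs.length : Int) ∧ PySem.List.pyGet? cs ((k : Int) + 1) = some '\''
          · rw [if_pos h3]
            have := ih (k + 2) inq (fun m hm => h m (by omega))
            push_cast at this; exact this
          · rw [if_neg h3]
            have := ih (k + 1) (!inq) (fun m hm => h m (by omega))
            push_cast at this; exact this
        · rw [if_neg h2]
          rw [if_neg (by rintro ⟨hx, -⟩
                         rw [List.cons.injEq] at hx
                         exact h k le_rfl (by rw [← hx.1]; exact hg))]
          have := ih (k + 1) inq (fun m hm => h m (by omega))
          push_cast at this; exact this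
    · rw [if_neg h1]

theorem pv_aLoop_skip (cs : List Char) (c0 : Char) (f : Nat) (k j : Nat) (inq : Bool)
    (hkj : k ≤ j) (hj : j ≤ cs.length) (hf : cs.length ≤ k + f)
    (h : ∀ m : Nat, k ≤ m → m < j → cs[m]? ≠ some '\'' ∧ (inq = false → cs[m]? ≠ some c0)) :
    aLoop cs [c0] f (k : Int) inq = aLoop cs [c0] f (j : Int) inq := by
  rcases Nat.eq_or_lt_of_le hkj with heq | hlt
  · rw [heq]
  · have hk : k < cs.length := by omega
    obtain ⟨hq, hc⟩ := h k le_rfl hlt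
    obtain ⟨c, hg⟩ : ∃ c, cs[k]? = some c := by
      rw [List.getElem?_eq_getElem hk]; exact ⟨_, rfl⟩
    have h1 : (k : Int) < (cs.length : Int) := by exact_mod_cast hk
    obtain ⟨g, rfl⟩ : ∃ g, f = g + 1 := ⟨f - 1, by omega⟩
    conv_lhs => simp only [aLoop]
    rw [if_pos h1, PySem.List.pyGet?_natCast, hg]
    show (if c = '\'' then (if inq = true ∧ (k : Int) + 1 < (cs.length : Int) ∧ PySem.List.pyGet? cs ((k : Int) + 1) = some '\'' then aLoop cs [c0] g ((k : Int) + 2) inq else aLoop cs [c0] g ((k : Int) + 1) (!inq)) else if [c] = [c0] ∧ inq = false then (k : Int) else aLoop cs [c0] g ((k : Int) + 1) inq) = _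
    rw [if_neg (by intro hcq; exact hq (by rw [← hcq]; exact hg))]
    rw [if_neg (by rintro ⟨hx, hinq⟩
                   rw [List.cons.injEq] at hx
                   exact hc hinq (by rw [← hx.1]; exact hg))]
    have hcast : ((k : Int) + 1) = ((k + 1 : Nat) : Int) := by push_cast; ring
    rw [hcast, pv_aLoop_fuel cs [c0] g (g + 1) (k + 1) inq (by omega) (by omega)]
    exact pv_aLoop_skip cs c0 (g + 1) (k + 1) j inq (by omega) hj (by omega)
      (fun m hm1 hm2 => h m (by omega) hm2)
termination_by j - k
decreasing_by omega

theorem pv_aLoop_succ (cs chl : List Char) (g : Nat) (i : Int) (inq : Bool) :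
    aLoop cs chl (g + 1) i inq =
      (if i < (cs.length : Int) then
        match PySem.List.pyGet? cs i with
        | none => -1
        | some c =>
          if c = '\'' then
            if inq = true ∧ i + 1 < (cs.length : Int) ∧ PySem.List.pyGet? cs (i + 1) = some '\'' then
              aLoop cs chl g (i + 2) inq
            else aLoop cs chl g (i + 1) (!inq)
          else if [c] = chl ∧ inq = false then i
          else aLoop cs chl g (i + 1) inq
      else -1) := rfl

theorem pv_bSkip_succ (cs : List Char) (g : Nat) (p : Int) :
    bSkip cs (g + 1) p =
      (if PySem.Chars.findFrom cs ['\''] p none = -1 then -1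
      else if PySem.Chars.findFrom cs ['\''] p none + 1 < (cs.length : Int) ∧
          PySem.List.pyGet? cs (PySem.Chars.findFrom cs ['\''] p none + 1) = some '\'' then
        bSkip cs g (PySem.Chars.findFrom cs ['\''] p none + 2)
      else PySem.Chars.findFrom cs ['\''] p none + 1) := rfl

theorem pv_bOuter_succ (cs chl : List Char) (g : Nat) (pos : Int) :
    bOuter cs chl (g + 1) pos =
      (if PySem.Chars.findFrom cs chl pos none = -1 then -1
      else if PySem.Chars.findFrom cs ['\''] pos none = -1 ∨
          PySem.Chars.findFrom cs chl pos none < PySem.Chars.findFrom cs ['\''] pos none then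
        PySem.Chars.findFrom cs chl pos none
      else if bSkip cs (cs.length + 2) (PySem.Chars.findFrom cs ['\''] pos none + 1) = -1 then -1
      else bOuter cs chl g (bSkip cs (cs.length + 2) (PySem.Chars.findFrom cs ['\''] pos none + 1))) := rfl

theorem pv_aLoop_quote (cs : List Char) (c0 : Char) (p : Nat) :
    aLoop cs [c0] (cs.length + 2) (p : Int) true =
      if bSkip cs (cs.length + 2) (p : Int) = -1 then -1
      else aLoop cs [c0] (cs.length + 2) (bSkip cs (cs.length + 2) (p : Int)) false := by
  by_cases hf : PySem.Chars.findFrom cs ['\''] (p : Int) none = -1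
  · have hbs : bSkip cs (cs.length + 2) (p : Int) = -1 := by
      rw [show cs.length + 2 = cs.length + 1 + 1 from rfl, pv_bSkip_succ, if_pos hf]
    rw [hbs, if_pos rfl]
    by_cases hp : p ≤ cs.length
    · rw [pv_aLoop_skip cs c0 (cs.length + 2) p cs.length true hp le_rfl (by omega)
        (fun m hm1 hm2 => ⟨pv_ff_no_occ cs '\'' p hf m hm1, by simp⟩)]
      rw [show cs.length + 2 = cs.length + 1 + 1 from rfl, pv_aLoop_succ, if_neg (by omega)]
    · rw [show cs.length + 2 = cs.length + 1 + 1 from rfl, pv_aLoop_succ, if_neg (by push_cast; omega)]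
  · obtain ⟨e, he, hpe, hge, hno⟩ := pv_ff_found cs '\'' p hf
    obtain ⟨he_lt, -⟩ := List.getElem?_eq_some_iff.mp hge
    rw [pv_aLoop_skip cs c0 (cs.length + 2) p e true hpe (by omega) (by omega)
        (fun m hm1 hm2 => ⟨hno m hm1 hm2, by simp⟩)]
    rw [show cs.length + 2 = cs.length + 1 + 1 from rfl, pv_aLoop_succ,
      if_pos (by exact_mod_cast he_lt), PySem.List.pyGet?_natCast, hge]
    show (if '\'' = '\'' then (if true = true ∧ (e : Int) + 1 < (cs.length : Int) ∧ PySem.List.pyGet? cs ((e : Int) + 1) = some '\'' then aLoop cs [c0] (cs.length + 1) ((e : Int) + 2) true else aLoop cs [c0] (cs.length + 1) ((e : Int) + 1) (!true)) else if ['\''] = [c0] ∧ true = false then (e : Int) else aLoop cs [c0] (cs.length + 1) ((e : Int) + 1) true) = _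
    rw [if_pos rfl]
    by_cases hesc : (e : Int) + 1 < (cs.length : Int) ∧ PySem.List.pyGet? cs ((e : Int) + 1) = some '\''
    · rw [if_pos ⟨rfl, hesc.1, hesc.2⟩]
      have hbs : bSkip cs (cs.length + 1 + 1) (p : Int) = bSkip cs (cs.length + 2) ((e + 2 : Nat) : Int) := by
        rw [pv_bSkip_succ, if_neg hf, he, if_pos (by rw [← he] at hesc ⊢; exact hesc)]
        rw [show (e : Int) + 2 = ((e + 2 : Nat) : Int) by push_cast; ring]
        exact pv_bSkip_fuel cs (cs.length + 1) (cs.length + 2) (e + 2) (by omega) (by omega)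
      rw [hbs]
      rw [show ((e : Int) + 2) = ((e + 2 : Nat) : Int) by push_cast; ring]
      rw [pv_aLoop_fuel cs [c0] (cs.length + 1) (cs.length + 2) (e + 2) true (by omega) (by omega)]
      exact pv_aLoop_quote cs c0 (e + 2)
    · rw [if_neg (by rintro ⟨-, h2, h3⟩; exact hesc ⟨h2, h3⟩)]
      have hbs : bSkip cs (cs.length + 1 + 1) (p : Int) = (e : Int) + 1 := by
        rw [pv_bSkip_succ, if_neg hf, he, if_neg (by rw [← he] at hesc ⊢; exact hesc)]
      rw [hbs, if_neg (by omega), Bool.not_true]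
      rw [show ((e : Int) + 1) = ((e + 1 : Nat) : Int) by push_cast; ring]
      exact pv_aLoop_fuel cs [c0] (cs.length + 1) (cs.length + 2) (e + 1) false (by omega) (by omega)
termination_by cs.length + 2 - p
decreasing_by omega

theorem pv_main (cs : List Char) (c0 : Char) (hc0 : c0 ≠ '\'') (pos : Nat) :
    aLoop cs [c0] (cs.length + 2) (pos : Int) false = bOuter cs [c0] (cs.length + 2) (pos : Int) := by
  rw [show cs.length + 2 = cs.length + 1 + 1 from rfl, pv_bOuter_succ]
  by_cases hcf : PySem.Chars.findFrom cs [c0] (pos : Int) none = -1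
  · rw [if_pos hcf]
    exact pv_aLoop_none cs c0 (cs.length + 1 + 1) pos false
      (fun m hm => pv_ff_no_occ cs c0 pos hcf m hm)
  · rw [if_neg hcf]
    obtain ⟨cn, hcn, hposc, hgc, hnoc⟩ := pv_ff_found cs c0 pos hcf
    obtain ⟨hcn_lt, -⟩ := List.getElem?_eq_some_iff.mp hgc
    by_cases hq : PySem.Chars.findFrom cs ['\''] (pos : Int) none = -1 ∨
        PySem.Chars.findFrom cs [c0] (pos : Int) none < PySem.Chars.findFrom cs ['\''] (pos : Int) none
    · rw [if_pos hq, hcn]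
      have hnq : ∀ m : Nat, pos ≤ m → m < cn → cs[m]? ≠ some '\'' := by
        intro m hm1 hm2
        rcases hq with hq1 | hq2
        · exact pv_ff_no_occ cs '\'' pos hq1 m hm1
        · obtain ⟨en, hen, hpen, hgen, hnoen⟩ :=
            pv_ff_found cs '\'' pos (by intro hx; rw [hx, hcn] at hq2; omega)
          intro hmq
          have : en ≤ m := by
            by_contra hlt
            exact hnoen m hm1 (by omega) hmq
          omega
      rw [pv_aLoop_skip cs c0 (cs.length + 1 + 1) pos cn false hposc (by omega) (by omega)
          (fun m hm1 hm2 => ⟨hnq m hm1 hm2, fun _ => hnoc m hm1 hm2⟩)]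
      rw [pv_aLoop_succ, if_pos (by exact_mod_cast hcn_lt), PySem.List.pyGet?_natCast, hgc]
      show (if c0 = '\'' then (if false = true ∧ (cn : Int) + 1 < (cs.length : Int) ∧ PySem.List.pyGet? cs ((cn : Int) + 1) = some '\'' then aLoop cs [c0] (cs.length + 1) ((cn : Int) + 2) false else aLoop cs [c0] (cs.length + 1) ((cn : Int) + 1) (!false)) else if [c0] = [c0] ∧ false = false then (cn : Int) else aLoop cs [c0] (cs.length + 1) ((cn : Int) + 1) false) = _
      rw [if_neg hc0, if_pos ⟨rfl, rfl⟩]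
    · rw [if_neg hq]
      push_neg at hq
      obtain ⟨hq1, hq2⟩ := hq
      obtain ⟨qn, hqn, hposq, hgq, hnoq⟩ := pv_ff_found cs '\'' pos hq1
      obtain ⟨hqn_lt, -⟩ := List.getElem?_eq_some_iff.mp hgq
      have hqc : qn < cn := by
        have hne : qn ≠ cn := by
          intro heq
          rw [heq, hgc] at hgq
          exact hc0 (Option.some.inj hgq)
        have : PySem.Chars.findFrom cs ['\''] (pos : Int) none ≤ PySem.Chars.findFrom cs [c0] (pos : Int) none := hq2
        omega
      rw [pv_aLoop_skip cs c0 (cs.length + 1 + 1) pos qn false hposq (by omega) (by omega)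
          (fun m hm1 hm2 => ⟨hnoq m hm1 hm2, fun _ => hnoc m hm1 (by omega)⟩)]
      rw [pv_aLoop_succ, if_pos (by exact_mod_cast hqn_lt), PySem.List.pyGet?_natCast, hgq]
      show (if '\'' = '\'' then (if false = true ∧ (qn : Int) + 1 < (cs.length : Int) ∧ PySem.List.pyGet? cs ((qn : Int) + 1) = some '\'' then aLoop cs [c0] (cs.length + 1) ((qn : Int) + 2) false else aLoop cs [c0] (cs.length + 1) ((qn : Int) + 1) (!false)) else if ['\''] = [c0] ∧ false = false then (qn : Int) else aLoop cs [c0] (cs.length + 1) ((qn : Int) + 1) false) = _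
      rw [if_pos rfl, if_neg (by rintro ⟨h, -⟩; cases h), Bool.not_false]
      rw [show ((qn : Int) + 1) = ((qn + 1 : Nat) : Int) by push_cast; ring]
      rw [pv_aLoop_fuel cs [c0] (cs.length + 1) (cs.length + 2) (qn + 1) true (by omega) (by omega)]
      rw [hqn, pv_aLoop_quote cs c0 (qn + 1)]
      rw [show ((qn : Int) + 1) = ((qn + 1 : Nat) : Int) by push_cast; ring]
      by_cases hbs : bSkip cs (cs.length + 2) ((qn + 1 : Nat) : Int) = -1
      · rw [if_pos hbs, if_pos hbs]
      · rw [if_neg hbs, if_neg hbs]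
        have hge := pv_bSkip_ge cs (cs.length + 2) ((qn + 1 : Nat) : Int) hbs
        have hle := pv_bSkip_le cs (cs.length + 2) ((qn + 1 : Nat) : Int) hbs
        have hr : bSkip cs (cs.length + 2) ((qn + 1 : Nat) : Int)
            = (((bSkip cs (cs.length + 2) ((qn + 1 : Nat) : Int)).toNat : Nat) : Int) := by omega
        rw [hr]
        rw [pv_aLoop_fuel cs [c0] (cs.length + 2) (cs.length + 2) _ false (by omega) (by omega)]
        rw [pv_bOuter_fuel cs [c0] (cs.length + 1) (cs.length + 2) _ (by omega) (by omega)]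
        exact pv_main cs c0 hc0 (bSkip cs (cs.length + 2) ((qn + 1 : Nat) : Int)).toNat
termination_by cs.length + 2 - pos
decreasing_by omega

theorem pv_top (s : String) (ch : String) (start : Int) (hpre : 0 ≤ start) :
    find_unquoted_py s ch start = find_unquoted_py_alt s ch start := by
  rw [find_unquoted_py, find_unquoted_py_alt]
  by_cases hg : PySem.Str.len ch ≠ 1 ∨ ch = "'"
  · rw [if_pos hg]
    apply pv_aLoop_deg
    intro x hx
    rcases hg with h | h
    · exfalso
      apply h
      rw [PySem.Str.len_eq, ← hx]
      rfl
    · rw [h] at hx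
      rw [show ("'".toList : List Char) = ['\''] from rfl] at hx
      exact (List.cons.injEq _ _ _ _ ▸ hx).1
  · rw [if_neg hg]
    push_neg at hg
    obtain ⟨hg1, hg2⟩ := hg
    have hlen : ch.toList.length = 1 := by
      rw [PySem.Str.len_eq] at hg1; exact_mod_cast hg1
    obtain ⟨c0, hch⟩ := List.length_eq_one_iff.mp hlen
    have hc0 : c0 ≠ '\'' := by
      intro he
      apply hg2
      apply String.toList_inj.mp
      rw [hch, he]
      rfl
    rw [hch, show start = ((start.toNat : Nat) : Int) from (Int.toNat_of_nonneg hpre).symm]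
    exact pv_main s.toList c0 hc0 start.toNat


-- ===== VERDICT (by name: the statement is the Claim_ definition above) =====
theorem find_unquoted_py_spec : Claim_equal_find_unquoted_py := by
  intro s ch start _ hpre
  show find_unquoted_py s ch start = find_unquoted_py_alt s ch start
  exact pv_top s ch start hpre
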